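-- pv_equiv track=rewrite | github.com/sucheet2000/sarvam-ai-cookbook | examples/multi-agent-system/tools/search.py | search
-- ===== SOURCE A (Python) =====
-- _KNOWLEDGE_BASE: list[dict[str, str]] = [
--     {
--         "title": "Sarvam AI",
--         "content": (
--             "Sarvam AI is an Indian AI company that builds large language models "
--             "and APIs for Indian languages including Hindi, Tamil, Telugu, Bengali, "
--             "Kannada, and more."
--         ),
--     },
--     {
--         "title": "Python",
--         "content": (
--             "Python is a high-level, general-purpose programming language known for "
--             "readability, simplicity, and a large standard library."
--         ),
--     },
--     {
--         "title": "RAG",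
--         "content": (
--             "Retrieval-Augmented Generation (RAG) combines a retrieval step with a "
--             "language model to answer questions grounded in a document corpus."
--         ),
--     },
--     {
--         "title": "LangChain",
--         "content": (
--             "LangChain is an open-source framework for building applications with "
--             "large language models, providing chains, agents, retrievers, and memory."
--         ),
--     },
--     {
--         "title": "AI Agents",
--         "content": (
--             "An AI agent is a system that perceives its environment, makes decisions, "
--             "and takes actions to achieve a goal, often using tools and memory."
--         ),
--     },
-- ]
--
-- def search(query: str, top_k: int = 2) -> str:
--     """Search the knowledge base using keyword overlap scoring.
--
--     Args:
--         query: Search query string.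
--         top_k: Maximum number of results to return.
--
--     Returns:
--         Formatted string of matching documents, or a 'no results' message.
--     """
--     query_words = set(query.lower().split())
--     scored: list[tuple[int, dict[str, str]]] = []
--
--     for doc in _KNOWLEDGE_BASE:
--         doc_text = (doc["title"] + " " + doc["content"]).lower()
--         doc_words = set(doc_text.split())
--         score = len(query_words & doc_words)
--         scored.append((score, doc))
--
--     scored.sort(key=lambda x: x[0], reverse=True)
--     results = [doc for score, doc in scored[:top_k] if score > 0]
--
--     if not results:
--         return "No relevant results found."
--
--     return "\n\n".join(
--         f"[{doc['title']}] {doc['content']}" for doc in results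
--     )
-- ===== SOURCE B (Python) =====
-- _KNOWLEDGE_BASE: list[dict[str, str]] = [
--     {
--         "title": "Sarvam AI",
--         "content": (
--             "Sarvam AI is an Indian AI company that builds large language models "
--             "and APIs for Indian languages including Hindi, Tamil, Telugu, Bengali, "
--             "Kannada, and more."
--         ),
--     },
--     {
--         "title": "Python",
--         "content": (
--             "Python is a high-level, general-purpose programming language known for "
--             "readability, simplicity, and a large standard library."
--         ),
--     },
--     {
--         "title": "RAG",
--         "content": (
--             "Retrieval-Augmented Generation (RAG) combines a retrieval step with a "
--             "language model to answer questions grounded in a document corpus."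
--         ),
--     },
--     {
--         "title": "LangChain",
--         "content": (
--             "LangChain is an open-source framework for building applications with "
--             "large language models, providing chains, agents, retrievers, and memory."
--         ),
--     },
--     {
--         "title": "AI Agents",
--         "content": (
--             "An AI agent is a system that perceives its environment, makes decisions, "
--             "and takes actions to achieve a goal, often using tools and memory."
--         ),
--     },
-- ]
--
--
-- def search(query: str, top_k: int = 2) -> str:
--     """Inverted-index search over the knowledge base (same results as the
--     keyword-overlap scorer): each distinct word maps to the documents that
--     contain it; query words vote, docs are ranked by votes."""
--     index: dict[str, list[int]] = {}
--     for i in range(len(_KNOWLEDGE_BASE)):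
--         doc_text = (_KNOWLEDGE_BASE[i]["title"] + " " + _KNOWLEDGE_BASE[i]["content"]).lower()
--         for w in set(doc_text.split()):
--             index.setdefault(w, []).append(i)
--
--     hits: dict[int, int] = {}
--     for w in set(query.lower().split()):
--         for i in index.get(w, []):
--             hits[i] = hits.get(i, 0) + 1
--
--     ranked = sorted(range(len(_KNOWLEDGE_BASE)), key=lambda i: hits.get(i, 0), reverse=True)
--     picked = [i for i in ranked[:top_k] if hits.get(i, 0) > 0]
--
--     if not picked:
--         return "No relevant results found."
--
--     return "\n\n".join(
--         f"[{_KNOWLEDGE_BASE[i]['title']}] {_KNOWLEDGE_BASE[i]['content']}" for i in picked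
--     )
-- ===== Notes on version B (the rewrite author's own statement) =====
-- stated objective: alternative
-- what changed: B replaces per-document set intersections and a sort of (score, doc) pairs by an inverted index (word -> doc indices) whose query-word votes fill a hit counter, then ranks document indices and formats the picked indices.
import Mathlib
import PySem

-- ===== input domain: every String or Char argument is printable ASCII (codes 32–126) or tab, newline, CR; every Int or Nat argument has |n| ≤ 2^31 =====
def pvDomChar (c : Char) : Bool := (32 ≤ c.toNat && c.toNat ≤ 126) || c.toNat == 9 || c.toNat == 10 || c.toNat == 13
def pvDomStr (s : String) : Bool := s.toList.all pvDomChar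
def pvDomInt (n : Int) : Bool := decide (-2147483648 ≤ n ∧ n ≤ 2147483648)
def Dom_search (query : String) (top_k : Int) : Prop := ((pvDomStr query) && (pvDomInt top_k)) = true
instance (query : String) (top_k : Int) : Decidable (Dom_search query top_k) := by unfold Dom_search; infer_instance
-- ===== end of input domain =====

-- B replaces per-document set intersections + a sort of (score, doc) pairs by an inverted
-- index whose query-word votes fill a hit counter over document indices (objective: alternative).

-- The fixed knowledge base, as (title, content) pairs (same-module constant of both Pythons).
def pvKB : List (String × String) :=
  [ ("Sarvam AI", "Sarvam AI is an Indian AI company that builds large language models and APIs for Indian languages including Hindi, Tamil, Telugu, Bengali, Kannada, and more."),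
    ("Python", "Python is a high-level, general-purpose programming language known for readability, simplicity, and a large standard library."),
    ("RAG", "Retrieval-Augmented Generation (RAG) combines a retrieval step with a language model to answer questions grounded in a document corpus."),
    ("LangChain", "LangChain is an open-source framework for building applications with large language models, providing chains, agents, retrievers, and memory."),
    ("AI Agents", "An AI agent is a system that perceives its environment, makes decisions, and takes actions to achieve a goal, often using tools and memory.") ]

-- set((doc["title"] + " " + doc["content"]).lower().split()) — appears verbatim in both Pythons
def pvWordsOf (doc : String × String) : PySem.Set String :=
  PySem.Set.ofList (PySem.Str.split₀ (PySem.Str.lower (doc.1 ++ " " ++ doc.2)))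

-- set(query.lower().split()) — appears verbatim in both Pythons
def pvQueryWords (query : String) : PySem.Set String :=
  PySem.Set.ofList (PySem.Str.split₀ (PySem.Str.lower query))

-- ===== PORT A =====
def search (query : String) (top_k : Int) : String :=
  let queryWords := pvQueryWords query
  let scored : List (Int × (String × String)) :=
    pvKB.foldl (fun acc doc =>
      acc ++ [(PySem.Set.len (PySem.Set.inter queryWords (pvWordsOf doc)), doc)]) []
  let ranked := PySem.List.sorted scored (fun x => x.1) true
  let results := (List.filter (fun p => decide (0 < p.1))
                    (PySem.List.slice ranked none (some top_k))).map (fun p => p.2)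
  if results.isEmpty then "No relevant results found."
  else PySem.Str.join "\n\n" (results.map (fun doc => "[" ++ doc.1 ++ "] " ++ doc.2))

-- ===== PORT B =====
def search_alt (query : String) (top_k : Int) : String :=
  let index : PySem.Dict String (List Int) :=
    (PySem.List.pyRange 0 (pvKB.length : Int) 1).foldl (fun d i =>
      (pvWordsOf (PySem.List.pyGetD pvKB i ("", ""))).foldl
        (fun d w => d.modify w [] (fun l => l ++ [i])) d) PySem.Dict.empty
  let hits : PySem.Dict Int Int :=
    (pvQueryWords query).foldl (fun h w =>
      (index.getD w []).foldl (fun h i => h.insert i (h.getD i 0 + 1)) h) PySem.Dict.empty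
  let ranked := PySem.List.sorted (PySem.List.pyRange 0 (pvKB.length : Int) 1)
                  (fun i => hits.getD i 0) true
  let picked := List.filter (fun i => decide (0 < hits.getD i 0))
                  (PySem.List.slice ranked none (some top_k))
  if picked.isEmpty then "No relevant results found."
  else PySem.Str.join "\n\n" (picked.map (fun i =>
    let doc := PySem.List.pyGetD pvKB i ("", "")
    "[" ++ doc.1 ++ "] " ++ doc.2))

-- ===== PRECONDITION & SPEC =====
def Spec_search (query : String) (top_k : Int) (out : String) : Prop := out = search_alt query top_k
instance (query : String) (top_k : Int) (out : String) : Decidable (Spec_search query top_k out) := by unfold Spec_search; infer_instance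

-- ===== CLAIM (what is proved, stated in full; the proofs are below) =====
def Claim_equal_search : Prop := ∀ (query : String) (top_k : Int), Dom_search query top_k → Spec_search query top_k (search query top_k)

-- ===== LEMMAS AND PROOFS =====

-- Proof-side names for the pipeline pieces (each defeq to the matching let-binding of a port).
def pvIdxs : List Int := PySem.List.pyRange 0 (pvKB.length : Int) 1

def pvDoc (i : Int) : String × String := PySem.List.pyGetD pvKB i ("", "")

def pvWs (i : Int) : PySem.Set String := pvWordsOf (PySem.List.pyGetD pvKB i ("", ""))

def pvIndex : PySem.Dict String (List Int) :=
  pvIdxs.foldl (fun d i =>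
    (pvWordsOf (PySem.List.pyGetD pvKB i ("", ""))).foldl
      (fun d w => d.modify w [] (fun l => l ++ [i])) d) PySem.Dict.empty

def pvHits (query : String) : PySem.Dict Int Int :=
  (pvQueryWords query).foldl (fun h w =>
    (pvIndex.getD w []).foldl (fun h i => h.insert i (h.getD i 0 + 1)) h) PySem.Dict.empty

def pvPairs : List (String × Int) :=
  pvIdxs.flatMap (fun i => (pvWs i).map (fun w => (w, i)))

def pvScore (query : String) (i : Int) : Int :=
  PySem.Set.len (PySem.Set.inter (pvQueryWords query) (pvWs i))

def pvPicked (q : String) (k : Int) : List Int :=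
  List.filter (fun i => decide (0 < (pvHits q).getD i 0))
    (PySem.List.slice (PySem.List.sorted pvIdxs (fun i => (pvHits q).getD i 0) true) none (some k))

theorem pvIndex_getD (w : String) :
    pvIndex.getD w [] = (pvPairs.filter (fun p => p.1 == w)).map (fun p => p.2) := by
  have h1 : (fun (d : PySem.Dict String (List Int)) (i : Int) =>
      (pvWordsOf (PySem.List.pyGetD pvKB i ("", ""))).foldl
        (fun d w => d.modify w [] (fun l => l ++ [i])) d)
      = fun d i => ((pvWs i).map (fun w => (w, i))).foldl
          (fun d p => d.modify p.1 [] (fun l => l ++ [p.2])) d := by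
    funext d i
    rw [List.foldl_map]
    rfl
  unfold pvIndex pvPairs
  rw [h1, ← List.foldl_flatMap, PySem.Dict.getD_foldl_modify_append, PySem.Dict.getD_empty,
    List.nil_append]

theorem pvCountBlock (k j : Int) (w : String) (ws : List String) :
    (((ws.map (fun w' => (w', k))).filter (fun p => p.1 == w)).map (fun p => p.2)).count j
      = if j = k then ws.count w else 0 := by
  rw [List.filter_map, List.map_map]
  have h2 : ((fun p : String × Int => p.2) ∘ fun w' => (w', k)) = fun _ => k := rfl
  have h3 : ((fun p : String × Int => p.1 == w) ∘ fun w' => (w', k)) = fun w' => w' == w := rfl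
  rw [h2, h3]
  have hc : (ws.filter (fun w' => w' == w)).length = ws.count w := by
    rw [show ws.count w = ws.countP (fun w' => w' == w) from rfl, List.countP_eq_length_filter]
  rw [List.map_const', List.count_replicate, hc]
  by_cases hj : j = k
  · simp [hj]
  · have hkj : (k == j) = false := by simp [Ne.symm hj]
    simp [hkj, hj]

theorem pvCount_in_idx (i : Int) (hi : i ∈ pvIdxs) (w : String) :
    (pvIndex.getD w []).count i = (pvWs i).count w := by
  rw [pvIndex_getD]
  have hp : pvPairs =
      ((pvWs 0).map (fun w => (w, (0:Int)))) ++ (((pvWs 1).map (fun w => (w, (1:Int)))) ++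
      (((pvWs 2).map (fun w => (w, (2:Int)))) ++ (((pvWs 3).map (fun w => (w, (3:Int)))) ++
      (((pvWs 4).map (fun w => (w, (4:Int)))) ++ ([] : List (String × Int)))))) := by
    unfold pvPairs
    rw [show pvIdxs = 0 :: 1 :: 2 :: 3 :: 4 :: ([] : List Int) from rfl]
    rw [List.flatMap_cons, List.flatMap_cons, List.flatMap_cons, List.flatMap_cons,
      List.flatMap_cons, List.flatMap_nil]
  rw [hp]
  simp only [List.filter_append, List.map_append, List.count_append, pvCountBlock,
    List.filter_nil, List.map_nil, List.count_nil]
  have hi' : i = 0 ∨ i = 1 ∨ i = 2 ∨ i = 3 ∨ i = 4 := by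
    rw [show pvIdxs = 0 :: 1 :: 2 :: 3 :: 4 :: ([] : List Int) from rfl] at hi
    simpa using hi
  rcases hi' with h | h | h | h | h <;> subst h <;> norm_num

theorem pvNodup_count (i : Int) (w : String) :
    (pvWs i).count w = if PySem.Set.contains (pvWs i) w then 1 else 0 := by
  have hnd : (pvWs i).Nodup := PySem.Set.nodup_ofList _
  by_cases hm : w ∈ pvWs i
  · have h1 : (pvWs i).count w = 1 := List.count_eq_one_of_mem hnd hm
    have h2 : PySem.Set.contains (pvWs i) w = true := (PySem.Set.contains_iff _ _).2 hm
    rw [h1, h2, if_pos rfl]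
  · have h1 : (pvWs i).count w = 0 := List.count_eq_zero_of_not_mem hm
    have h2 : PySem.Set.contains (pvWs i) w = false := by
      cases hc : PySem.Set.contains (pvWs i) w
      · rfl
      · exact absurd ((PySem.Set.contains_iff _ _).1 hc) hm
    rw [h1, h2]
    simp

set_option maxRecDepth 4096 in
theorem pvHits_getD (q : String) (i : Int) (hi : i ∈ pvIdxs) :
    (pvHits q).getD i 0 = pvScore q i := by
  unfold pvHits
  rw [← List.foldl_flatMap, PySem.Dict.getD_foldl_insert_add_one, PySem.Dict.getD_empty,
    List.count_flatMap, zero_add]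
  have hsum : ∀ (l : List String),
      (l.map (List.count i ∘ fun w => pvIndex.getD w [])).sum
        = l.countP (fun w => PySem.Set.contains (pvWs i) w) := by
    intro l
    induction l with
    | nil => simp
    | cons a t ih =>
      rw [List.map_cons, List.sum_cons, List.countP_cons, ih]
      simp only [Function.comp_apply]
      rw [pvCount_in_idx i hi a, pvNodup_count]
      by_cases hc : PySem.Set.contains (pvWs i) a <;> simp [hc] <;> omega
  rw [hsum]
  unfold pvScore
  rw [show PySem.Set.inter (pvQueryWords q) (pvWs i)
      = (pvQueryWords q).filter (fun w => PySem.Set.contains (pvWs i) w) from rfl]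
  simp [PySem.Set.len, List.countP_eq_length_filter]

theorem pvInsertBy_congr {α : Type} (p q : α → α → Bool) (x : α) (ys : List α)
    (h : ∀ y ∈ ys, p x y = q x y) :
    PySem.List.insertBy p x ys = PySem.List.insertBy q x ys := by
  induction ys with
  | nil => rfl
  | cons y t ih =>
    have hy : p x y = q x y := h y (by simp)
    show (if p x y then x :: y :: t else y :: PySem.List.insertBy p x t)
        = (if q x y then x :: y :: t else y :: PySem.List.insertBy q x t)
    rw [hy, ih (fun z hz => h z (by simp [hz]))]

theorem pvInsertBy_map {α β : Type} (f : α → β) (p : β → β → Bool) (q : α → α → Bool)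
    (hpq : ∀ a b, p (f a) (f b) = q a b) (x : α) (ys : List α) :
    PySem.List.insertBy p (f x) (ys.map f) = (PySem.List.insertBy q x ys).map f := by
  induction ys with
  | nil => rfl
  | cons y t ih =>
    show (if p (f x) (f y) then f x :: f y :: t.map f
          else f y :: PySem.List.insertBy p (f x) (t.map f))
        = (if q x y then x :: y :: t else y :: PySem.List.insertBy q x t).map f
    rw [hpq x y]
    by_cases h : q x y <;> simp [h, ih]

theorem pvSorted_map {α β : Type} (l : List α) (f : α → β) (key : β → Int) :
    PySem.List.sorted (l.map f) key true
      = (PySem.List.sorted l (fun a => key (f a)) true).map f := by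
  show (l.map f).foldl
      (fun acc x => PySem.List.insertBy (fun a b => decide (key b < key a)) x acc) []
      = (l.foldl (fun acc x =>
          PySem.List.insertBy (fun a b => decide (key (f b) < key (f a))) x acc) []).map f
  rw [List.foldl_map]
  have main : ∀ (t : List α) (acc : List α),
      t.foldl (fun acc a =>
        PySem.List.insertBy (fun a b => decide (key b < key a)) (f a) acc) (acc.map f)
        = (t.foldl (fun acc a =>
            PySem.List.insertBy (fun a b => decide (key (f b) < key (f a))) a acc) acc).map f := by
    intro t
    induction t with
    | nil => intro acc; rfl
    | cons a t ih =>
      intro acc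
      simp only [List.foldl_cons]
      rw [pvInsertBy_map f _ _ (fun a b => rfl) a acc, ih]
  exact main l []

theorem pvSorted_key_congr (l : List Int) (k1 k2 : Int → Int)
    (h : ∀ a ∈ l, k1 a = k2 a) :
    PySem.List.sorted l k1 true = PySem.List.sorted l k2 true := by
  show l.foldl (fun acc x => PySem.List.insertBy (fun a b => decide (k1 b < k1 a)) x acc) []
      = l.foldl (fun acc x => PySem.List.insertBy (fun a b => decide (k2 b < k2 a)) x acc) []
  have main : ∀ (t : List Int) (acc : List Int),
      (∀ a ∈ t, k1 a = k2 a) → (∀ a ∈ acc, k1 a = k2 a) →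
      t.foldl (fun acc x => PySem.List.insertBy (fun a b => decide (k1 b < k1 a)) x acc) acc
        = t.foldl (fun acc x => PySem.List.insertBy (fun a b => decide (k2 b < k2 a)) x acc) acc := by
    intro t
    induction t with
    | nil => intro acc _ _; rfl
    | cons a t ih =>
      intro acc ht hacc
      simp only [List.foldl_cons]
      have ha : k1 a = k2 a := ht a (by simp)
      have hins : PySem.List.insertBy (fun a b => decide (k1 b < k1 a)) a acc
          = PySem.List.insertBy (fun a b => decide (k2 b < k2 a)) a acc := by
        apply pvInsertBy_congr
        intro y hy
        rw [ha, hacc y hy]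
      rw [hins]
      refine ih _ (fun z hz => ht z (by simp [hz])) ?_
      intro z hz
      rcases (PySem.List.mem_insertBy _ _ _ _).1 hz with h' | h'
      · rw [h']; exact ha
      · exact hacc z h'
  exact main l [] h (by simp)

theorem pvSlice_map {α β : Type} (f : α → β) (l : List α) (b : Int) :
    PySem.List.slice (l.map f) none (some b) = (PySem.List.slice l none (some b)).map f := by
  simp [PySem.List.slice, List.length_map, List.map_take]

theorem search_eq_alt (q : String) (k : Int) : search q k = search_alt q k := by
  have hB : search_alt q k =
      (if (pvPicked q k).isEmpty then "No relevant results found."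
       else PySem.Str.join "\n\n" ((pvPicked q k).map (fun i =>
         "[" ++ (pvDoc i).1 ++ "] " ++ (pvDoc i).2))) := rfl
  rw [hB]
  have hscored : (pvKB.foldl (fun acc doc =>
        acc ++ [(PySem.Set.len (PySem.Set.inter (pvQueryWords q) (pvWordsOf doc)), doc)]) [])
      = pvIdxs.map (fun i => (pvScore q i, pvDoc i)) := by
    rw [PySem.List.foldl_append_singleton_eq_map
      (fun doc => (PySem.Set.len (PySem.Set.inter (pvQueryWords q) (pvWordsOf doc)), doc)) pvKB []]
    rw [List.nil_append, show pvKB = pvIdxs.map pvDoc from rfl, List.map_map]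
    rfl
  have hmem : ∀ i ∈ PySem.List.slice
      (PySem.List.sorted pvIdxs (fun i => (pvHits q).getD i 0) true) none (some k),
      i ∈ pvIdxs := by
    intro i hi
    exact (PySem.List.mem_sorted _ _ _ _).1 (PySem.List.mem_of_mem_slice _ _ _ hi)
  have hres : (List.filter (fun p : Int × (String × String) => decide (0 < p.1))
        (PySem.List.slice
          (PySem.List.sorted
            (pvKB.foldl (fun acc doc =>
              acc ++ [(PySem.Set.len (PySem.Set.inter (pvQueryWords q) (pvWordsOf doc)), doc)]) [])
            (fun x => x.1) true) none (some k))).map (fun p => p.2)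
      = (pvPicked q k).map pvDoc := by
    rw [hscored, pvSorted_map pvIdxs (fun i => (pvScore q i, pvDoc i)) (fun x => x.1)]
    rw [pvSorted_key_congr pvIdxs (fun i => pvScore q i) (fun i => (pvHits q).getD i 0)
      (fun i hi => (pvHits_getD q i hi).symm)]
    rw [pvSlice_map, List.filter_map]
    have hfil : List.filter ((fun p : Int × (String × String) => decide (0 < p.1)) ∘
          fun i => (pvScore q i, pvDoc i))
          (PySem.List.slice
            (PySem.List.sorted pvIdxs (fun i => (pvHits q).getD i 0) true) none (some k))
        = pvPicked q k := by
      apply List.filter_congr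
      intro i hi
      simp only [Function.comp_apply]
      rw [← pvHits_getD q i (hmem i hi)]
    rw [hfil, List.map_map]
    rfl
  have hA : search q k =
      (if ((pvPicked q k).map pvDoc).isEmpty then "No relevant results found."
       else PySem.Str.join "\n\n" (((pvPicked q k).map pvDoc).map
         (fun doc => "[" ++ doc.1 ++ "] " ++ doc.2))) := by
    show (if ((List.filter (fun p : Int × (String × String) => decide (0 < p.1))
        (PySem.List.slice
          (PySem.List.sorted
            (pvKB.foldl (fun acc doc =>
              acc ++ [(PySem.Set.len (PySem.Set.inter (pvQueryWords q) (pvWordsOf doc)), doc)]) [])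
            (fun x => x.1) true) none (some k))).map (fun p => p.2)).isEmpty
        then "No relevant results found."
        else PySem.Str.join "\n\n" (((List.filter (fun p : Int × (String × String) => decide (0 < p.1))
        (PySem.List.slice
          (PySem.List.sorted
            (pvKB.foldl (fun acc doc =>
              acc ++ [(PySem.Set.len (PySem.Set.inter (pvQueryWords q) (pvWordsOf doc)), doc)]) [])
            (fun x => x.1) true) none (some k))).map (fun p => p.2)).map
          (fun doc => "[" ++ doc.1 ++ "] " ++ doc.2))) = _
    rw [hres]
  rw [hA, List.isEmpty_map, List.map_map]
  rfl

-- ===== VERDICT (by name: the statement is the Claim_ definition above) =====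
theorem search_spec : Claim_equal_search := by
  intro query top_k _
  unfold Spec_search
  exact search_eq_alt query top_k
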